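-- pv_equiv track=rewrite | github.com/ChenyangGao/web-mount-packs | python-115-client/examples/updatedb.py | cut_iter
-- ===== SOURCE A (Python) =====
-- from collections.abc import Collection, Iterator, Iterable
--
-- def cut_iter(
--     start: int,
--     stop: None | int = None,
--     step: int = 1,
-- ) -> Iterator[tuple[int, int]]:
--     if stop is None:
--         start, stop = 0, start
--     for mid in range(start + step, stop, step):
--         yield start, step
--         start = mid
--     if start < stop:
--         yield start, stop - start
-- ===== SOURCE B (Python) =====
-- def cut_iter(
--     start: int,
--     stop: None | int = None,
--     step: int = 1,
-- ):
--     if stop is None: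
--         start, stop = 0, start
--     # closed-form chunk count: ceil((stop-start)/step) - 1 full chunks, clamped at 0
--     full = max(0, -((start - stop) // step) - 1)
--     for i in range(full):
--         yield start + i * step, step
--     last = start + full * step
--     if last < stop:
--         yield last, stop - last
-- ===== Notes on version B (the rewrite author's own statement) =====
-- stated objective: alternative
-- what changed: B computes the number of full chunks in closed form with ceiling division (max(0, -((start-stop)//step)-1)) and emits chunk i by the formula start+i*step, instead of A's stepping loop over range(start+step, stop, step) that mutates a running start and derives the tail from leftover loop state.
-- outside the precondition, e.g. on cut_iter(10, 3, 0): A raises ValueError, B raises ZeroDivisionError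
import Mathlib
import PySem

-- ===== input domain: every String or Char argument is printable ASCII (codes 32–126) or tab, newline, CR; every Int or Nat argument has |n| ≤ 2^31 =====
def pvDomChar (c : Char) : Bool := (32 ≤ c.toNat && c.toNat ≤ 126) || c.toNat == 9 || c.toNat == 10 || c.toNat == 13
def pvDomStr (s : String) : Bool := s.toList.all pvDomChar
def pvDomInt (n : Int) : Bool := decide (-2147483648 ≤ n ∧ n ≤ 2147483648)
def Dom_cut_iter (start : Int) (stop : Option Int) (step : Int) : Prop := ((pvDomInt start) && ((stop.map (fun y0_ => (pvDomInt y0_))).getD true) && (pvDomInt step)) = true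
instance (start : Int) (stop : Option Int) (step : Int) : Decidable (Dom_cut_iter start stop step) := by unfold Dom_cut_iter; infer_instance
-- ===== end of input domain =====

-- B replaces A's stepping loop with a running start by a closed-form ceiling-division chunk count
-- and per-index chunk formula (alternative decomposition; same asymptotic cost).
-- Pre_ excludes step = 0, on which A raises ValueError (B raises ZeroDivisionError).


-- ===== PORT A =====
def cut_iter (start : Int) (stop : Option Int) (step : Int) : List (Int × Int) :=
  -- if stop is None: start, stop = 0, start
  let p : Int × Int := match stop with | none => (0, start) | some s => (start, s)
  -- for mid in range(start + step, stop, step): yield start, step; start = mid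
  let r := (PySem.List.pyRange (p.1 + step) p.2 step).foldl
    (fun (q : List (Int × Int) × Int) mid => (q.1 ++ [(q.2, step)], mid)) ([], p.1)
  -- if start < stop: yield start, stop - start
  if r.2 < p.2 then r.1 ++ [(r.2, p.2 - r.2)] else r.1

-- ===== PORT B =====
def cut_iter_alt (start : Int) (stop : Option Int) (step : Int) : List (Int × Int) :=
  -- if stop is None: start, stop = 0, start
  let p : Int × Int := match stop with | none => (0, start) | some s => (start, s)
  -- full = max(0, -((start - stop) // step) - 1)
  let full : Int := max 0 (-(PySem.Int.floordiv (p.1 - p.2) step) - 1)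
  -- for i in range(full): yield start + i * step, step
  let init := (PySem.List.pyRange 0 full 1).map (fun i => (p.1 + i * step, step))
  -- last = start + full * step
  let last : Int := p.1 + full * step
  -- if last < stop: yield last, stop - last
  if last < p.2 then init ++ [(last, p.2 - last)] else init

-- ===== PRECONDITION & SPEC =====
-- Pre_ excludes exactly step = 0, on which Python's A raises ValueError (from range).
def Pre_cut_iter (start : Int) (stop : Option Int) (step : Int) : Prop := step ≠ 0
instance (start : Int) (stop : Option Int) (step : Int) : Decidable (Pre_cut_iter start stop step) := by unfold Pre_cut_iter; infer_instance
def pvWitness_cut_iter : Int × Option Int × Int := (10, some 25, 7)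

def Spec_cut_iter (start : Int) (stop : Option Int) (step : Int) (out : List (Int × Int)) : Prop := out = cut_iter_alt start stop step
instance (start : Int) (stop : Option Int) (step : Int) (out : List (Int × Int)) : Decidable (Spec_cut_iter start stop step out) := by unfold Spec_cut_iter; infer_instance

-- ===== CLAIM =====
def Claim_equal_cut_iter : Prop := ∀ (start : Int) (stop : Option Int) (step : Int), Dom_cut_iter start stop step → Pre_cut_iter start stop step → Spec_cut_iter start stop step (cut_iter start stop step)

-- ===== LEMMAS AND PROOFS =====

-- A's loop shape: folding over the mid-list with a running start produces all but the last
-- boundary paired with step, and ends with the last boundary as the running start.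
theorem cutA_foldl (step : Int) (L : List Int) (acc : List (Int × Int)) (s : Int) :
    L.foldl (fun (q : List (Int × Int) × Int) mid => (q.1 ++ [(q.2, step)], mid)) (acc, s)
      = (acc ++ ((s :: L).dropLast).map (fun x => (x, step)), L.getLastD s) := by
  induction L generalizing acc s with
  | nil => simp
  | cons m L ih =>
    simp only [List.foldl_cons, ih, List.dropLast_cons_of_ne_nil (List.cons_ne_nil m L)]
    cases L <;> simp [List.getLastD]

-- full-chunk count, positive step: pyRange's count is B's clamped ceiling-division formula
theorem cut_count_pos (a b s : Int) (hs : 0 < s) :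
    (if a + s < b then ((b - (a + s) + s - 1) / s).toNat else 0)
      = (max 0 (-(PySem.Int.floordiv (a - b) s) - 1)).toNat := by
  rw [PySem.Int.floordiv_eq_ediv_of_pos hs]
  set q := (a - b) / s with hq
  set c := (b - (a + s) + s - 1) / s with hc
  have h1 := Int.mul_ediv_add_emod (a - b) s
  have h2 := Int.mul_ediv_add_emod (b - (a + s) + s - 1) s
  have h3 := Int.emod_nonneg (a - b) (by omega : s ≠ 0)
  have h4 := Int.emod_lt_of_pos (a - b) hs
  have h5 := Int.emod_nonneg (b - (a + s) + s - 1) (by omega : s ≠ 0)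
  have h6 := Int.emod_lt_of_pos (b - (a + s) + s - 1) hs
  have hsum : s * (q + c) = s * q + s * c := by ring
  have hval : s * (q + c) = -1 - (a - b) % s - (b - (a + s) + s - 1) % s := by
    rw [hsum]; linarith
  have h4' : (a - b) % s ≤ s - 1 := by omega
  have h6' : (b - (a + s) + s - 1) % s ≤ s - 1 := by omega
  have hqc : q + c = -1 := by
    rcases lt_trichotomy (q + c) (-1) with h | h | h
    · have h' : q + c ≤ -2 := by omega
      have := mul_le_mul_of_nonneg_left h' (le_of_lt hs)
      linarith
    · exact h
    · have h' : (0:Int) ≤ q + c := by omega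
      have := mul_nonneg (le_of_lt hs) h'
      linarith
  have hneg : -q - 1 = c := by omega
  rw [hneg]
  split_ifs with h
  · have hc0 : 0 ≤ c := by
      by_contra hne
      have h' : c ≤ -1 := by omega
      have := mul_le_mul_of_nonneg_left h' (le_of_lt hs)
      linarith
    rw [max_eq_right hc0]
  · have hcle : c ≤ 0 := by
      by_contra hne
      have h' : (1:Int) ≤ c := by omega
      have := mul_le_mul_of_nonneg_left h' (le_of_lt hs)
      linarith
    rw [max_eq_left hcle]
    simp

-- full-chunk count, negative step
theorem cut_count_neg (a b s : Int) (hs : s < 0) :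
    (if b < a + s then ((a + s - b + -s - 1) / -s).toNat else 0)
      = (max 0 (-(PySem.Int.floordiv (a - b) s) - 1)).toNat := by
  set q := PySem.Int.floordiv (a - b) s with hq
  set c := (a + s - b + -s - 1) / -s with hc
  have ht : 0 < -s := by omega
  have h1 := PySem.Int.floordiv_mul_add_mod (a - b) s
  have hmb := PySem.Int.mod_neg_bounds (a - b) hs
  have h2 := Int.mul_ediv_add_emod (a + s - b + -s - 1) (-s)
  have h5 := Int.emod_nonneg (a + s - b + -s - 1) (by omega : -s ≠ 0)
  have h6 := Int.emod_lt_of_pos (a + s - b + -s - 1) ht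
  have hsum : (-s) * (q + c) = -(q * s) + (-s) * c := by ring
  have hval : (-s) * (q + c) = -1 + PySem.Int.mod (a - b) s - (a + s - b + -s - 1) % -s := by
    rw [hsum]; linarith
  have hmod' : s + 1 ≤ PySem.Int.mod (a - b) s := by omega
  have hr2' : (a + s - b + -s - 1) % -s ≤ -s - 1 := by omega
  have hqc : q + c = -1 := by
    rcases lt_trichotomy (q + c) (-1) with h | h | h
    · have h' : q + c ≤ -2 := by omega
      have := mul_le_mul_of_nonneg_left h' (le_of_lt ht)
      linarith
    · exact h
    · have h' : (0:Int) ≤ q + c := by omega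
      have := mul_nonneg (le_of_lt ht) h'
      linarith
  have hneg : -q - 1 = c := by omega
  rw [hneg]
  split_ifs with h
  · have hc0 : 0 ≤ c := by
      by_contra hne
      have h' : c ≤ -1 := by omega
      have := mul_le_mul_of_nonneg_left h' (le_of_lt ht)
      linarith
    rw [max_eq_right hc0]
  · have hcle : c ≤ 0 := by
      by_contra hne
      have h' : (1:Int) ≤ c := by omega
      have := mul_le_mul_of_nonneg_left h' (le_of_lt ht)
      linarith
    rw [max_eq_left hcle]
    simp

-- the mid-list of A as an explicit map over the closed-form chunk count of B
theorem midlist_eq_map (a b s : Int) (hs : s ≠ 0) :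
    PySem.List.pyRange (a + s) b s
      = (List.range (max 0 (-(PySem.Int.floordiv (a - b) s) - 1)).toNat).map
          (fun k : Nat => a + s + s * (k : Int)) := by
  by_cases hpos : 0 < s
  · rw [PySem.List.pyRange_of_pos (a + s) b hpos, cut_count_pos a b s hpos]
  · have hneg : s < 0 := by omega
    simp only [PySem.List.pyRange, if_neg hs, if_neg hpos]
    rw [cut_count_neg a b s hneg]

-- chunk boundaries as a map over List.range: cons then dropLast is the shifted map
theorem boundary_dropLast (a s : Int) (N : Nat) :
    (a :: (List.range N).map (fun k : Nat => a + s + s * (k : Int))).dropLast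
      = (List.range N).map (fun k : Nat => a + s * (k : Int)) := by
  have hcons : a :: (List.range N).map (fun k : Nat => a + s + s * (k : Int))
      = (List.range (N + 1)).map (fun k : Nat => a + s * (k : Int)) := by
    rw [List.range_succ_eq_map, List.map_cons, List.map_map]
    refine congrArg₂ _ (by simp) (List.map_congr_left ?_)
    intro k _
    simp only [Function.comp_apply, Nat.succ_eq_add_one]
    push_cast
    ring
  rw [hcons, List.range_succ, List.map_append, List.map_cons, List.map_nil, List.dropLast_concat]

-- the last boundary in closed form
theorem boundary_getLastD (a s : Int) (N : Nat) :
    ((List.range N).map (fun k : Nat => a + s + s * (k : Int))).getLastD a = a + (N : Int) * s := by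
  cases N with
  | zero => simp
  | succ M =>
    rw [List.range_succ, List.map_append, List.map_cons, List.map_nil, List.getLastD_concat]
    push_cast
    ring

-- the two programs agree once stop is normalized to an Int
theorem cut_core_eq (a b s : Int) (hs : s ≠ 0) :
    (let r := (PySem.List.pyRange (a + s) b s).foldl
        (fun (q : List (Int × Int) × Int) mid => (q.1 ++ [(q.2, s)], mid)) ([], a)
     if r.2 < b then r.1 ++ [(r.2, b - r.2)] else r.1)
    = (let full : Int := max 0 (-(PySem.Int.floordiv (a - b) s) - 1)
       let init := (PySem.List.pyRange 0 full 1).map (fun i => (a + i * s, s))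
       let last : Int := a + full * s
       if last < b then init ++ [(last, b - last)] else init) := by
  have h0 : (0:Int) ≤ max 0 (-(PySem.Int.floordiv (a - b) s) - 1) := le_max_left _ _
  obtain ⟨N, hNeq⟩ : ∃ N : Nat, max 0 (-(PySem.Int.floordiv (a - b) s) - 1) = (N : Int) :=
    ⟨_, (Int.toNat_of_nonneg h0).symm⟩
  have hmid : PySem.List.pyRange (a + s) b s
      = (List.range N).map (fun k : Nat => a + s + s * (k : Int)) := by
    rw [midlist_eq_map a b s hs, hNeq]
    simp
  have hcomp : ((fun i : Int => (a + i * s, s)) ∘ (fun k : Nat => (k : Int)))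
      = fun k : Nat => (a + s * (k : Int), s) := by
    funext k
    simp [mul_comm]
  have hcomp2 : ((fun x : Int => (x, s)) ∘ (fun k : Nat => a + s * (k : Int)))
      = fun k : Nat => (a + s * (k : Int), s) := rfl
  simp only [hmid, cutA_foldl, List.nil_append, boundary_dropLast, boundary_getLastD,
    hNeq, PySem.List.pyRange_zero_natCast, List.map_map, hcomp, hcomp2]

-- ===== VERDICT =====
theorem cut_iter_spec : Claim_equal_cut_iter := by
  intro start stop step _ hpre
  unfold Spec_cut_iter cut_iter cut_iter_alt
  cases stop with
  | none => exact cut_core_eq 0 start step hpre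
  | some b => exact cut_core_eq start b step hpre
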